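-- pv_equiv track=rewrite | github.com/YuToutCourt/ZhonyaS | services/draft_simulator.py | _extract_champion_from_response
-- ===== SOURCE A (Python) =====
-- from typing import List, Dict, Optional, Tuple
--
-- def _extract_champion_from_response(response: str, available_champions: List[str]) -> Optional[str]:
--     """Extrait le nom du champion de la réponse de l'IA"""
--     # Nettoyer la réponse
--     response = response.strip().strip('"\'.,!?')
--
--     # Chercher une correspondance exacte
--     for champion in available_champions:
--         if champion.lower() == response.lower():
--             return champion
--
--     # Chercher une correspondance partielle
--     for champion in available_champions:
--         if champion.lower() in response.lower() or response.lower() in champion.lower():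
--             return champion
--
--     return None
-- ===== SOURCE B (Python) =====
-- from typing import List, Optional
--
-- def _extract_champion_from_response(response: str, available_champions: List[str]) -> Optional[str]:
--     """Single pass: exact match returns immediately; first partial match is kept as fallback."""
--     rl = response.strip().strip('"\'.,!?').lower()
--     fallback = None
--     for champion in available_champions:
--         cl = champion.lower()
--         if cl == rl:
--             return champion
--         if fallback is None and (cl in rl or rl in cl):
--             fallback = champion
--     return fallback
-- ===== Notes on version B (the rewrite author's own statement) =====
-- stated objective: alternative
-- what changed: Fuses A's two sequential scans (exact pass, then partial pass) into one pass that returns on an exact match and keeps the first partial match as a fallback, lowering the stripped response once instead of on every comparison.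
import Mathlib
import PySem

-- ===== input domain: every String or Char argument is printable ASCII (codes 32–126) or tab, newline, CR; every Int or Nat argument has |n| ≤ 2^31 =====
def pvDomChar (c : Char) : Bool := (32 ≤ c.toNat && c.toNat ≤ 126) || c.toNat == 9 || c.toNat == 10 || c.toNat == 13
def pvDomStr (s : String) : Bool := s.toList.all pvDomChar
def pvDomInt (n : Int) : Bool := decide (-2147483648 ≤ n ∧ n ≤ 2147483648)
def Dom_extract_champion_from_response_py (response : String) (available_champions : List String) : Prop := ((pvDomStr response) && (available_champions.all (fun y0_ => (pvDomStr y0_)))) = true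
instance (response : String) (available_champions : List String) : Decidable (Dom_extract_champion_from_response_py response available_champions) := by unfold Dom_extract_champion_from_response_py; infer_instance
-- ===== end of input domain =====

-- B fuses A's two sequential scans into a single pass that returns an exact match
-- immediately and keeps the first partial match as a fallback (objective: alternative).

-- ===== PORT A =====
-- A: strip the response, then one scan for an exact (case-insensitive) match,
-- then a second scan for a partial (substring either way) match, else None.
def extract_champion_from_response_py (response : String) (available_champions : List String) : Option String :=
  let r := PySem.Str.stripChars (PySem.Str.strip response) "\"'.,!?"
  match available_champions.find? (fun champion => PySem.Str.lower champion == PySem.Str.lower r) with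
  | some champion => some champion
  | none =>
    available_champions.find? (fun champion =>
      PySem.Str.isIn (PySem.Str.lower champion) (PySem.Str.lower r)
        || PySem.Str.isIn (PySem.Str.lower r) (PySem.Str.lower champion))

-- ===== PORT B =====
-- B's loop: carries the first partial match seen as `fallback`.
def pvAltLoop (rl : String) (fallback : Option String) : List String → Option String
  | [] => fallback
  | champion :: rest =>
    let cl := PySem.Str.lower champion
    if cl == rl then some champion
    else if fallback.isNone && (PySem.Str.isIn cl rl || PySem.Str.isIn rl cl) then
      pvAltLoop rl (some champion) rest
    else
      pvAltLoop rl fallback rest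

def extract_champion_from_response_py_alt (response : String) (available_champions : List String) : Option String :=
  let rl := PySem.Str.lower (PySem.Str.stripChars (PySem.Str.strip response) "\"'.,!?")
  pvAltLoop rl none available_champions

-- ===== PRECONDITION & SPEC =====
def Spec_extract_champion_from_response_py (response : String) (available_champions : List String) (out : Option String) : Prop := out = extract_champion_from_response_py_alt response available_champions
instance (response : String) (available_champions : List String) (out : Option String) : Decidable (Spec_extract_champion_from_response_py response available_champions out) := by unfold Spec_extract_champion_from_response_py; infer_instance

-- ===== CLAIM (what is proved, stated in full; the proofs are below) =====
def Claim_equal_extract_champion_from_response_py : Prop := ∀ (response : String) (available_champions : List String), Dom_extract_champion_from_response_py response available_champions → Spec_extract_champion_from_response_py response available_champions (extract_champion_from_response_py response available_champions)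

-- ===== LEMMAS AND PROOFS =====

-- The fused loop = (first exact match) orElse (fallback) orElse (first partial match).
theorem pvAltLoop_eq (rl : String) (fallback : Option String) (l : List String) :
    pvAltLoop rl fallback l =
      match l.find? (fun c => PySem.Str.lower c == rl) with
      | some c => some c
      | none =>
        match fallback with
        | some f => some f
        | none =>
          l.find? (fun c => PySem.Str.isIn (PySem.Str.lower c) rl || PySem.Str.isIn rl (PySem.Str.lower c)) := by
  induction l generalizing fallback with
  | nil => cases fallback <;> simp [pvAltLoop]
  | cons champion rest ih =>
    simp only [pvAltLoop, List.find?]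
    by_cases hx : (PySem.Str.lower champion == rl) = true
    · simp [hx]
    · simp only [hx, Bool.false_eq_true, if_false]
      cases fallback with
      | some f =>
        simp only [Option.isNone_some, Bool.false_and, Bool.false_eq_true, if_false, ih]
      | none =>
        simp only [Option.isNone_none, Bool.true_and]
        cases hp : (PySem.Str.isIn (PySem.Str.lower champion) rl
            || PySem.Str.isIn rl (PySem.Str.lower champion)) with
        | true =>
          rw [if_pos rfl, ih]
        | false =>
          rw [if_neg (by simp), ih]

-- ===== VERDICT (by name: the statement is the Claim_ definition above) =====
theorem extract_champion_from_response_py_spec : Claim_equal_extract_champion_from_response_py := by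
  intro response available_champions _
  unfold Spec_extract_champion_from_response_py
  unfold extract_champion_from_response_py extract_champion_from_response_py_alt
  rw [pvAltLoop_eq]
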